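-- pv_equiv track=rewrite | github.com/ValerioBelcamino/pdiddyelle | partial_plan_validator.py | count_executed_instructions
-- ===== SOURCE A (Python) =====
-- from typing import Dict, List, Optional, Set, Tuple
--
-- def extract_plan_prefix(plan_text: str, instruction_count: int) -> str:
--     """
--     Return the plan prefix that includes only the first `instruction_count`
--     timestamped instructions.
--     """
--     if instruction_count <= 0 or not plan_text:
--         return ""
--
--     collected_lines = []
--     seen = 0
--     for line in plan_text.splitlines(keepends=True):
--         collected_lines.append(line)
--         if ":" in line:
--             seen += 1
--             if seen == instruction_count:
--                 break
--     return "".join(collected_lines)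
--
-- def count_executed_instructions(plan_text: str) -> Tuple[int, str]:
--     """
--     Count the timestamped instructions in the plan and return both the count
--     and the corresponding plan segment.
--     """
--     if not plan_text:
--         return 0, ""
--
--     executed = 0
--     for line in plan_text.splitlines():
--         if ":" in line:
--             executed += 1
--     return executed, extract_plan_prefix(plan_text, executed)
-- ===== SOURCE B (Python) =====
-- def count_executed_instructions(plan_text):
--     """Single pass over keepends-split lines: count colon lines and record
--     the cut offset just past the last colon line; slice once at the end."""
--     executed = 0
--     pos = 0
--     cut = 0
--     for line in plan_text.splitlines(keepends=True):
--         pos += len(line)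
--         if ":" in line:
--             executed += 1
--             cut = pos
--     return executed, plan_text[:cut]
-- ===== Notes on version B (the rewrite author's own statement) =====
-- stated objective: simpler
-- what changed: Replaces A's two scans (count pass plus the extract_plan_prefix helper that re-splits and re-collects lines up to the counted total) by one pass over splitlines(keepends=True) that counts colon lines and records the cut offset past the last one, then slices once.
import Mathlib
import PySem

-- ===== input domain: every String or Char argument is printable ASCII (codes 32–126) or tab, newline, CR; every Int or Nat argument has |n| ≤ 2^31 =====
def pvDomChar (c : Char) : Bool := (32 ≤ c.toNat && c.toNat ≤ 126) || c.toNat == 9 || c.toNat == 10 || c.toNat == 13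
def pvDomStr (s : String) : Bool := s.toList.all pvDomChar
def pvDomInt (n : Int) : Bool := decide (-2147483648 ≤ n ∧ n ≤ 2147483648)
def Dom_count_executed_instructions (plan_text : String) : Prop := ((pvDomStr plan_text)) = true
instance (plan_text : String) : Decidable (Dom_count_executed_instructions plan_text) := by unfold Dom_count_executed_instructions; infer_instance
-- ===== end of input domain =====

-- B is one pass over splitlines(keepends=True) instead of A's count pass plus the
-- extract_plan_prefix helper's second split-and-collect pass; same return value on Dom.

-- ===== PORT A =====
-- '":" in line'
def pvP (line : List Char) : Bool := PySem.Chars.isIn [':'] line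

-- splitlines(keepends=True), ported by hand (PySem has only the keepends=False form);
-- exact on Dom, whose only line breaks are '\n', '\r' and the pair '\r\n'.
def pvKlGo : List Char → List Char → List (List Char)
  | [], cur => if cur.isEmpty then [] else [cur.reverse]
  | '\r' :: '\n' :: rest, cur => (cur.reverse ++ ['\r', '\n']) :: pvKlGo rest []
  | c :: rest, cur =>
      if c = '\n' ∨ c = '\r' then (cur.reverse ++ [c]) :: pvKlGo rest []
      else pvKlGo rest (c :: cur)

def pvKeepLines (cs : List Char) : List (List Char) := pvKlGo cs []

-- the for-loop of extract_plan_prefix: collect lines, stop when seen reaches the target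
def pvEpLoop : List (List Char) → Int → Int → List Char
  | [], _, _ => []
  | line :: rest, seen, target =>
      if pvP line then
        if seen + 1 = target then line
        else line ++ pvEpLoop rest (seen + 1) target
      else line ++ pvEpLoop rest seen target

def extract_plan_prefix (plan_text : String) (instruction_count : Int) : String :=
  if instruction_count ≤ 0 ∨ plan_text.toList.isEmpty then ""
  else String.ofList (pvEpLoop (pvKeepLines plan_text.toList) 0 instruction_count)

def count_executed_instructions (plan_text : String) : Int × String :=
  if plan_text.toList.isEmpty then (0, "")
  else
    let executed : Int :=
      (PySem.Chars.splitlines plan_text.toList).foldl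
        (fun acc line => if pvP line then acc + 1 else acc) 0
    (executed, extract_plan_prefix plan_text executed)

-- ===== PORT B =====
def count_executed_instructions_alt (plan_text : String) : Int × String :=
  let r : Int × Nat × Nat :=
    (pvKeepLines plan_text.toList).foldl
      (fun s line =>
        let pos := s.2.1 + line.length
        if pvP line then (s.1 + 1, pos, pos) else (s.1, pos, s.2.2))
      (0, 0, 0)
  (r.1, String.ofList (plan_text.toList.take r.2.2))

-- ===== PRECONDITION & SPEC =====
def Spec_count_executed_instructions (plan_text : String) (out : Int × String) : Prop := out = count_executed_instructions_alt plan_text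
instance (plan_text : String) (out : Int × String) : Decidable (Spec_count_executed_instructions plan_text out) := by unfold Spec_count_executed_instructions; infer_instance

-- ===== CLAIM (what is proved, stated in full; the proofs are below) =====
def Claim_equal_count_executed_instructions : Prop := ∀ (plan_text : String), Dom_count_executed_instructions plan_text → Spec_count_executed_instructions plan_text (count_executed_instructions plan_text)

-- ===== LEMMAS AND PROOFS =====

lemma pvP_iff_mem (l : List Char) : pvP l = true ↔ ':' ∈ l := by
  rw [pvP, PySem.Chars.isIn_iff_infix, List.singleton_infix_iff]

lemma pvP_append_end (l e : List Char) (h : ':' ∉ e) : pvP (l ++ e) = pvP l := by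
  apply Bool.coe_iff_coe.mp
  rw [pvP_iff_mem, pvP_iff_mem, List.mem_append]
  constructor
  · rintro (h1 | h1)
    · exact h1
    · exact absurd h1 h
  · exact Or.inl

lemma pvP_reverse (l : List Char) : pvP l.reverse = pvP l := by
  apply Bool.coe_iff_coe.mp
  rw [pvP_iff_mem, pvP_iff_mem, List.mem_reverse]

-- total length of the kept lines is the input (plus the pending reversed current line)
lemma pvKlGo_flatten (cs cur : List Char) : (pvKlGo cs cur).flatten = cur.reverse ++ cs := by
  induction cs, cur using pvKlGo.induct <;> simp_all [pvKlGo]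

-- cut offset of the last colon line, from the left
def pvCut : List (List Char) → Nat
  | [] => 0
  | l :: ls => if pvP l || ls.any pvP then l.length + pvCut ls else 0

lemma pvAny_iff (L : List (List Char)) : L.any pvP = true ↔ 0 < L.countP pvP := by
  rw [List.any_eq_true, List.countP_pos_iff]

lemma pvCut_of_no_colon (L : List (List Char)) (h : L.countP pvP = 0) : pvCut L = 0 := by
  cases L with
  | nil => rfl
  | cons l ls =>
    simp only [List.countP_cons] at h
    have h2 : pvP l = false := by
      rcases Bool.eq_false_or_eq_true (pvP l) with hb | hb
      · simp [hb] at h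
      · exact hb
    have h3 : ls.any pvP = false := by
      rcases Bool.eq_false_or_eq_true (ls.any pvP) with hb | hb
      · have := (pvAny_iff ls).mp hb; omega
      · exact hb
    simp [pvCut, h2, h3]

-- B's fold, characterised
lemma pvFold_eq (L : List (List Char)) (e : Int) (pos cut : Nat) :
    L.foldl (fun s line =>
        let p := s.2.1 + line.length
        if pvP line then (s.1 + 1, p, p) else (s.1, p, s.2.2))
      (e, pos, cut)
    = (e + L.countP pvP, pos + L.flatten.length,
       if L.any pvP then pos + pvCut L else cut) := by
  induction L generalizing e pos cut with
  | nil => simp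
  | cons l ls ih =>
    simp only [List.foldl_cons]
    by_cases hp : pvP l = true
    · rw [if_pos hp, ih]
      simp only [Prod.mk.injEq]
      refine ⟨by simp [hp]; ring, by
        simp [List.flatten_cons]; omega, ?_⟩
      by_cases ha : ls.any pvP = true
      · rw [if_pos ha, if_pos (by simp [hp]), pvCut, if_pos (by simp [hp])]
        omega
      · have hfa : ls.any pvP = false := by simpa using ha
        have h0 : ls.countP pvP = 0 := by
          rcases Nat.eq_zero_or_pos (ls.countP pvP) with h | h
          · exact h
          · rw [(pvAny_iff ls).mpr h] at hfa; cases hfa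
        rw [if_neg ha, if_pos (by simp [hp]), pvCut, if_pos (by simp [hp]),
            pvCut_of_no_colon ls h0]
        omega
    · have hp' : pvP l = false := by simpa using hp
      rw [if_neg hp, ih]
      simp only [Prod.mk.injEq]
      refine ⟨by simp [hp'], by simp [List.flatten_cons]; omega, ?_⟩
      by_cases ha : ls.any pvP = true
      · rw [if_pos ha, if_pos (by simp [hp', ha]), pvCut, if_pos (by simp [hp', ha])]
        omega
      · have hfa : ls.any pvP = false := by simpa using ha
        rw [if_neg ha, if_neg (by simp [hp', hfa]) ]

-- A's extract loop equals the take at B's cut offset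
lemma pvEpLoop_eq (L : List (List Char)) (seen : Int)
    (h : 0 < L.countP pvP) :
    pvEpLoop L seen (seen + L.countP pvP) = L.flatten.take (pvCut L) := by
  induction L generalizing seen with
  | nil => simp at h
  | cons l ls ih =>
    simp only [List.countP_cons, pvEpLoop, List.flatten_cons]
    by_cases hp : pvP l = true
    · rw [if_pos hp]
      by_cases h0 : ls.countP pvP = 0
      · have ht : seen + 1 = seen + ((ls.countP pvP + if pvP l then 1 else 0 : Nat) : Int) := by
          simp [hp, h0]
        rw [if_pos ht]
        have ha : ls.any pvP = false := by
          rcases Bool.eq_false_or_eq_true (ls.any pvP) with hb | hb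
          · have := (pvAny_iff ls).mp hb; omega
          · exact hb
        rw [pvCut, if_pos (by simp [hp]), pvCut_of_no_colon ls h0]
        simp
      · have hpos : 0 < ls.countP pvP := Nat.pos_of_ne_zero h0
        have ht : ¬ (seen + 1 = seen + ((ls.countP pvP + if pvP l then 1 else 0 : Nat) : Int)) := by
          rw [if_pos hp]; omega
        rw [if_neg ht]
        have harg : seen + ((ls.countP pvP + if pvP l then 1 else 0 : Nat) : Int)
            = (seen + 1) + ls.countP pvP := by simp [hp]; ring
        rw [harg, ih (seen + 1) hpos]
        rw [pvCut, if_pos (by simp [(pvAny_iff ls).mpr hpos])]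
        simp [List.take_append]
    · have hp' : pvP l = false := by simpa using hp
      rw [if_neg hp]
      have hpos : 0 < ls.countP pvP := by simpa [hp'] using h
      have harg : seen + ((ls.countP pvP + if pvP l then 1 else 0 : Nat) : Int)
          = seen + ls.countP pvP := by simp [hp']
      rw [harg, ih seen hpos]
      rw [pvCut, if_pos (by simp [(pvAny_iff ls).mpr hpos])]
      simp [List.take_append]

-- A's counting fold over splitlines agrees with the colon count over the kept lines
lemma pvGo_countP (isB : Char → Bool) (cs cur : List Char) (acc : List (List Char))
    (h : ∀ c ∈ cs, isB c = decide (c = '\n' ∨ c = '\r')) :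
    (PySem.Chars.splitlines.go isB cs cur acc).countP pvP
      = acc.countP pvP + (pvKlGo cs cur).countP pvP := by
  induction cs, cur using pvKlGo.induct generalizing acc with
  | case1 cur hc =>
    simp_all [PySem.Chars.splitlines.go, pvKlGo]
  | case2 cur hc =>
    simp_all [PySem.Chars.splitlines.go, pvKlGo, List.countP_cons, pvP_reverse]
  | case3 rest cur ih =>
    rw [show PySem.Chars.splitlines.go isB ('\r' :: '\n' :: rest) cur acc
          = PySem.Chars.splitlines.go isB rest [] (cur.reverse :: acc) from by
        simp [PySem.Chars.splitlines.go]]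
    rw [ih (cur.reverse :: acc) (fun c hc => h c (by simp [hc]))]
    simp [pvKlGo, List.countP_cons, pvP_reverse, pvP_append_end _ ['\r','\n'] (by simp)]
    ring
  | case4 c rest cur hne hbr ih =>
    have hB : isB c = true := by
      rw [h c (by simp), decide_eq_true_iff]; exact hbr
    have hgo : PySem.Chars.splitlines.go isB (c :: rest) cur acc
        = PySem.Chars.splitlines.go isB rest [] (cur.reverse :: acc) := by
      rw [PySem.Chars.splitlines.go.eq_def]
      split
      · rename_i heq; simp at heq
      · rename_i heq
        injection heq with h1 h2
        exact (hne _ h1 h2).elim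
      · rename_i c' rest' heq
        injection heq with h1 h2
        subst h1; subst h2; rw [if_pos hB]
    rw [hgo, ih (cur.reverse :: acc) (fun c hc => h c (by simp [hc]))]
    have hnc : ':' ∉ [c] := by
      rcases hbr with rfl | rfl <;> simp
    rw [pvKlGo, if_pos hbr]
    · simp [List.countP_cons, pvP_reverse, pvP_append_end _ [c] hnc]
      ring
    · exact hne
  | case5 c rest cur hne hbr ih =>
    have hB : isB c = false := by
      rw [h c (by simp)]
      simpa using hbr
    have hgo : PySem.Chars.splitlines.go isB (c :: rest) cur acc
        = PySem.Chars.splitlines.go isB rest (c :: cur) acc := by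
      rw [PySem.Chars.splitlines.go.eq_def]
      split
      · rename_i heq; simp at heq
      · rename_i heq
        injection heq with h1 h2
        exact (hne _ h1 h2).elim
      · rename_i c' rest' heq
        injection heq with h1 h2
        subst h1; subst h2; rw [if_neg (by simp [hB])]
    rw [hgo, ih acc (fun c hc => h c (by simp [hc]))]
    rw [pvKlGo, if_neg hbr]
    exact hne

lemma pvChar_eq_of_toNat (c : Char) (n : Nat) (h : c.toNat = n) : c = Char.ofNat n := by
  have := Char.ofNat_toNat c; rw [h] at this; exact this.symm

lemma pvCount_eq (cs : List Char) (h : ∀ c ∈ cs, pvDomChar c = true) :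
    (PySem.Chars.splitlines cs).countP pvP = (pvKeepLines cs).countP pvP := by
  have hmain := pvGo_countP
    (fun c => decide (c.toNat = 10) || decide (c.toNat = 13) || decide (c.toNat = 11) ||
      decide (c.toNat = 12) || decide (c.toNat = 28) || decide (c.toNat = 29) ||
      decide (c.toNat = 30) || decide (c.toNat = 133) || decide (c.toNat = 8232) ||
      decide (c.toNat = 8233)) cs [] []
    (by
      intro c hc
      have hd := h c hc
      simp only [pvDomChar, Bool.or_eq_true, Bool.and_eq_true, decide_eq_true_iff,
        beq_iff_eq] at hd
      have hiff : (c = '\n' ∨ c = '\r') ↔ (c.toNat = 10 ∨ c.toNat = 13) := by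
        constructor
        · rintro (rfl | rfl) <;> simp
        · rintro (h10 | h13)
          · left; rw [pvChar_eq_of_toNat c 10 h10]
          · right; rw [pvChar_eq_of_toNat c 13 h13]
      apply Bool.coe_iff_coe.mp
      simp only [Bool.or_eq_true, decide_eq_true_iff, hiff]
      omega)
  rw [show PySem.Chars.splitlines cs
      = PySem.Chars.splitlines.go
        (fun c => decide (c.toNat = 10) || decide (c.toNat = 13) || decide (c.toNat = 11) ||
          decide (c.toNat = 12) || decide (c.toNat = 28) || decide (c.toNat = 29) ||
          decide (c.toNat = 30) || decide (c.toNat = 133) || decide (c.toNat = 8232) ||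
          decide (c.toNat = 8233)) cs [] [] from rfl, hmain]
  simp [pvKeepLines]

-- ===== VERDICT (by name: the statement is the Claim_ definition above) =====
theorem count_executed_instructions_spec : Claim_equal_count_executed_instructions := by
  intro s hdom
  have hall : ∀ c ∈ s.toList, pvDomChar c = true := by
    have h2 := hdom
    unfold Dom_count_executed_instructions pvDomStr at h2
    rw [List.all_eq_true] at h2
    exact h2
  unfold Spec_count_executed_instructions
  unfold count_executed_instructions count_executed_instructions_alt extract_plan_prefix
  simp only [pvFold_eq, PySem.List.foldl_count_if pvP, pvCount_eq s.toList hall]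
  by_cases hemp : s.toList.isEmpty
  · have hnil : s.toList = [] := by simpa using hemp
    rw [if_pos hemp]
    simp [pvKeepLines, hnil, pvKlGo]
  · rw [if_neg hemp]
    by_cases h0 : (pvKeepLines s.toList).countP pvP = 0
    · have hany : (pvKeepLines s.toList).any pvP = false := by
        rcases Bool.eq_false_or_eq_true ((pvKeepLines s.toList).any pvP) with hb | hb
        · have := (pvAny_iff _).mp hb; omega
        · exact hb
      have hA : ((0:Int) + ((pvKeepLines s.toList).countP pvP : Int) ≤ 0 ∨
          s.toList.isEmpty = true) := Or.inl (by rw [h0]; simp)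
      have hB : ¬ ((pvKeepLines s.toList).any pvP = true) := by simp [hany]
      rw [if_pos hA, if_neg hB]
      simp
    · have hpos : 0 < (pvKeepLines s.toList).countP pvP := Nat.pos_of_ne_zero h0
      have hany : (pvKeepLines s.toList).any pvP = true := (pvAny_iff _).mpr hpos
      have hA : ¬ ((0:Int) + ((pvKeepLines s.toList).countP pvP : Int) ≤ 0 ∨
          s.toList.isEmpty = true) := by
        exact not_or.mpr ⟨by omega, hemp⟩
      rw [if_neg hA, if_pos hany]
      rw [pvEpLoop_eq (pvKeepLines s.toList) 0 hpos]
      rw [show (pvKeepLines s.toList).flatten = s.toList from pvKlGo_flatten s.toList []]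
      simp
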